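-- pv_equiv track=rewrite | github.com/wwPDB/py-wwpdb_apps_entity_transform | wwpdb/apps/entity_transform/prd/HtmlUtil.py | addSelect
-- ===== SOURCE A (Python) =====
-- def addSelect(name, value, enum):
--     """ Write HTML section tag
--     """
--     background = 'style = "background-color:#D3D6FF;"'
--     if value:
--         for v in enum:
--             if v == value:
--                 background = ''
--                 break
--             #
--         #
--     #
--     text = '<select ' + background + ' name="' + name + '">\n'
--     for v in enum:
--         text += '<option value="' + v + '" '
--         if v == value:
--             text += 'selected'
--         text += ' /> <span style="font-size:20px;font-weight:bold">' + v + '</span> \n'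
--         #
--     text += '</select>\n'
--     return text
-- ===== SOURCE B (Python) =====
-- def addSelect(name, value, enum):
--     """ Write HTML section tag
--     """
--     opts = ''
--     found = False
--     for v in enum:
--         sel = 'selected' if v == value else ''
--         if v == value:
--             found = True
--         opts += '<option value="' + v + '" ' + sel + ' /> <span style="font-size:20px;font-weight:bold">' + v + '</span> \n'
--     background = '' if (value and found) else 'style = "background-color:#D3D6FF;"'
--     return '<select ' + background + ' name="' + name + '">\n' + opts + '</select>\n'
-- ===== Notes on version B (the rewrite author's own statement) =====
-- stated objective: simpler
-- what changed: One pass over enum accumulating the option strings and a found flag, with the background decided after the loop, instead of A's separate membership-scan loop followed by a second build loop.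
import Mathlib
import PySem

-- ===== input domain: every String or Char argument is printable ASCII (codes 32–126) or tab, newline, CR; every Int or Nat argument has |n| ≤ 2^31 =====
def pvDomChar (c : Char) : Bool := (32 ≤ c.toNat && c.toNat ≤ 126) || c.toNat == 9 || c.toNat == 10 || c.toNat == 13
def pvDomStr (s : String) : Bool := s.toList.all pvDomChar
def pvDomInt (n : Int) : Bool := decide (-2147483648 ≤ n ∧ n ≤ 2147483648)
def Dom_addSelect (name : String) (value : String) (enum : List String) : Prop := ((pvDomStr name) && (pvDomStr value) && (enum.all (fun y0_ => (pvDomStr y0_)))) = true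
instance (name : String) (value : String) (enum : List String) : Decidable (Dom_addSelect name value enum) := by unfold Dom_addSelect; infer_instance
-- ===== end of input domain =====

-- B builds the option markup and a found-flag in one pass over enum and decides the background afterwards, instead of A's separate membership-scan loop plus build loop (objective: simpler).


-- ===== PORT A =====
-- first loop of A: scan enum for value, clearing the background on a match (break)
def addSelectBgLoop (value : String) : List String → String
  | [] => "style = \"background-color:#D3D6FF;\""
  | v :: rest => if v = value then "" else addSelectBgLoop value rest

def addSelect (name : String) (value : String) (enum : List String) : String :=
  let background :=
    if value ≠ "" then addSelectBgLoop value enum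
    else "style = \"background-color:#D3D6FF;\""
  let text := "<select " ++ background ++ " name=\"" ++ name ++ "\">\n"
  let text := enum.foldl (fun t v =>
    let t := t ++ "<option value=\"" ++ v ++ "\" "
    let t := if v = value then t ++ "selected" else t
    t ++ " /> <span style=\"font-size:20px;font-weight:bold\">" ++ v ++ "</span> \n") text
  text ++ "</select>\n"

-- ===== PORT B =====
def addSelect_alt (name : String) (value : String) (enum : List String) : String :=
  let p := enum.foldl (fun (p : String × Bool) v =>
    let sel := if v = value then "selected" else ""
    let found := if v = value then true else p.2
    (p.1 ++ "<option value=\"" ++ v ++ "\" " ++ sel ++ " /> <span style=\"font-size:20px;font-weight:bold\">" ++ v ++ "</span> \n", found)) ("", false)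
  let background := if value ≠ "" ∧ p.2 = true then "" else "style = \"background-color:#D3D6FF;\""
  "<select " ++ background ++ " name=\"" ++ name ++ "\">\n" ++ p.1 ++ "</select>\n"

-- ===== PRECONDITION & SPEC =====
def Spec_addSelect (name : String) (value : String) (enum : List String) (out : String) : Prop := out = addSelect_alt name value enum
instance (name : String) (value : String) (enum : List String) (out : String) : Decidable (Spec_addSelect name value enum out) := by unfold Spec_addSelect; infer_instance

-- ===== CLAIM (what is proved, stated in full; the proofs are below) =====
def Claim_equal_addSelect : Prop := ∀ (name : String) (value : String) (enum : List String), Dom_addSelect name value enum → Spec_addSelect name value enum (addSelect name value enum)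

-- ===== LEMMAS AND PROOFS =====

-- the per-option chunk both loops append (depends only on v and value)
theorem foldl_append_shift (s : String) (l : List String) :
    List.foldl (fun r t => r ++ t) s l = s ++ List.foldl (fun r t => r ++ t) "" l := by
  induction l generalizing s with
  | nil => simp
  | cons t rest ih =>
      simp only [List.foldl_cons]
      rw [ih, ih ("" ++ t)]
      simp [String.append_assoc]

-- the per-option chunk both loops append (depends only on v and value)
def optChunk (value v : String) : String :=
  "<option value=\"" ++ v ++ "\" " ++ (if v = value then "selected" else "") ++
    " /> <span style=\"font-size:20px;font-weight:bold\">" ++ v ++ "</span> \n"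

theorem a_fold_chunk (value : String) (l : List String) (s : String) :
    l.foldl (fun t v =>
      let t := t ++ "<option value=\"" ++ v ++ "\" "
      let t := if v = value then t ++ "selected" else t
      t ++ " /> <span style=\"font-size:20px;font-weight:bold\">" ++ v ++ "</span> \n") s
    = s ++ String.join (l.map (optChunk value)) := by
  induction l generalizing s with
  | nil => simp [String.join]
  | cons v rest ih =>
      simp only [List.foldl_cons, List.map_cons, String.join] at *
      rw [ih, foldl_append_shift]
      by_cases h : v = value <;>
        simp [h, optChunk, String.append_assoc] <;>
          (conv_rhs => rw [foldl_append_shift]) <;> simp [String.append_assoc]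

theorem b_fold_chunk (value : String) (l : List String) (s : String) (b : Bool) :
    l.foldl (fun (p : String × Bool) v =>
      let sel := if v = value then "selected" else ""
      let found := if v = value then true else p.2
      (p.1 ++ "<option value=\"" ++ v ++ "\" " ++ sel ++ " /> <span style=\"font-size:20px;font-weight:bold\">" ++ v ++ "</span> \n", found)) (s, b)
    = (s ++ String.join (l.map (optChunk value)), b || l.any (fun v => decide (v = value))) := by
  induction l generalizing s b with
  | nil => simp [String.join]
  | cons v rest ih =>
      simp only [List.foldl_cons, List.map_cons, String.join, List.any_cons] at *
      rw [ih, foldl_append_shift]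
      by_cases h : v = value <;>
        simp [h, optChunk, String.append_assoc] <;>
          (conv_rhs => rw [foldl_append_shift]) <;> simp [String.append_assoc]

theorem bg_loop_any (value : String) (l : List String) :
    addSelectBgLoop value l
    = (if l.any (fun v => decide (v = value)) then "" else "style = \"background-color:#D3D6FF;\"") := by
  induction l with
  | nil => simp [addSelectBgLoop]
  | cons v rest ih =>
      by_cases h : v = value <;> simp [addSelectBgLoop, h, ih]

-- ===== VERDICT (by name: the statement is the Claim_ definition above) =====
theorem addSelect_spec : Claim_equal_addSelect := by
  unfold Claim_equal_addSelect Spec_addSelect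
  intro name value enum _
  simp only [addSelect, addSelect_alt, a_fold_chunk, b_fold_chunk, bg_loop_any]
  by_cases hv : value = "" <;>
    by_cases ha : enum.any (fun v => decide (v = value)) = true <;>
      simp [hv, ha, String.append_assoc]
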